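-- pv_equiv track=rewrite | github.com/KiaOnigiri/Python | python/Олимпиада/2-lo.py | sopryag
-- ===== SOURCE A (Python) =====
-- def sopryag(N):
--     s=[]
--     sm=sum([int(z) for z in str(N)])
--     for M in range(100,999+1):
--         if N%2==0 and int(str(M)[0])%2!=0:
--             continue
--         if N%2!=0 and int(str(M)[0])%2==0:
--             continue
--         if int(str(M)[-2:])==sm:
--             s.append(M)
--     return s
-- ===== SOURCE B (Python) =====
-- def sopryag(N):
--     sm = sum([int(z) for z in str(N)])
--     res = []
--     if 0 <= sm <= 99:
--         start = 1 if N % 2 != 0 else 2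
--         for d1 in range(start, 10, 2):
--             res.append(d1 * 100 + sm)
--     return res
-- ===== Notes on version B (the rewrite author's own statement) =====
-- stated objective: faster
-- what changed: Instead of scanning all 900 three-digit candidates and parsing their digit strings, B directly constructs each answer d1*100+sm for the 4-5 first digits d1 matching N's parity.
import Mathlib
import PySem

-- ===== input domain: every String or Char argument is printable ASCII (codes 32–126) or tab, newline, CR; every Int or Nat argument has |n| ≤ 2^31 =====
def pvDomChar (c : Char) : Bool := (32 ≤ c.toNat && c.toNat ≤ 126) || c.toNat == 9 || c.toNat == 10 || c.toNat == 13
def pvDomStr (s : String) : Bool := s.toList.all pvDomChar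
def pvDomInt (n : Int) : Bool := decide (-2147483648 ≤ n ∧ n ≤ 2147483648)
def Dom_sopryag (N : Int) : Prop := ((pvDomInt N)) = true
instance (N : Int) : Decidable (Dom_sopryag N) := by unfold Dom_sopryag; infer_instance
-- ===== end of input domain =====

-- B replaces A's scan over all 900 three-digit numbers (with string parsing per candidate)
-- by directly constructing d1*100+sm for each first digit d1 of matching parity (objective: faster, constant-factor).

-- ===== PORT A =====
def sopryag (N : Int) : List Int :=
  -- sm = sum([int(z) for z in str(N)]); int('-') raises ValueError, excluded by Pre_ (N ≥ 0)
  let sm := ((PySem.Int.toChars N).map (fun z => (PySem.Int.ofChars? [z]).getD 0)).sum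
  (PySem.List.pyRange 100 (999+1) 1).foldl (fun s M =>
    if PySem.Int.mod N 2 = 0 ∧ PySem.Int.mod ((PySem.Int.ofChars? [PySem.List.pyGetD (PySem.Int.toChars M) 0 '0']).getD 0) 2 ≠ 0 then s
    else if PySem.Int.mod N 2 ≠ 0 ∧ PySem.Int.mod ((PySem.Int.ofChars? [PySem.List.pyGetD (PySem.Int.toChars M) 0 '0']).getD 0) 2 = 0 then s
    else if (PySem.Int.ofChars? (PySem.List.slice (PySem.Int.toChars M) (some (-2)) none)).getD 0 = sm then s ++ [M]
    else s) []

-- ===== PORT B =====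
def sopryag_alt (N : Int) : List Int :=
  let sm := ((PySem.Int.toChars N).map (fun z => (PySem.Int.ofChars? [z]).getD 0)).sum
  if 0 ≤ sm ∧ sm ≤ 99 then
    let start := if PySem.Int.mod N 2 ≠ 0 then (1 : Int) else 2
    (PySem.List.pyRange start 10 2).foldl (fun res d1 => res ++ [d1 * 100 + sm]) []
  else []

-- ===== PRECONDITION & SPEC =====
-- Pre_ excludes N < 0, where str(N) starts with '-' and int('-') raises ValueError in both A and B.
def Pre_sopryag (N : Int) : Prop := 0 ≤ N
instance (N : Int) : Decidable (Pre_sopryag N) := by unfold Pre_sopryag; infer_instance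
def pvWitness_sopryag : Int := 4

def Spec_sopryag (N : Int) (out : List Int) : Prop := out = sopryag_alt N
instance (N : Int) (out : List Int) : Decidable (Spec_sopryag N out) := by unfold Spec_sopryag; infer_instance

-- ===== CLAIM (what is proved, stated in full; the proofs are below) =====
def Claim_equal_sopryag : Prop := ∀ (N : Int), Dom_sopryag N → Pre_sopryag N → Spec_sopryag N (sopryag N)

-- ===== LEMMAS AND PROOFS =====

-- first digit of str(M) as an int, and int(str(M)[-2:]) — the two parsed quantities of A's loop body
def fd (M : Int) : Int := (PySem.Int.ofChars? [PySem.List.pyGetD (PySem.Int.toChars M) 0 '0']).getD 0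
def lt2 (M : Int) : Int := (PySem.Int.ofChars? (PySem.List.slice (PySem.Int.toChars M) (some (-2)) none)).getD 0

-- on each hundred-block, the parsed first digit is the block index and the parsed last two digits are M - 100*d
set_option maxRecDepth 1000000 in
theorem blocksFact : ((PySem.List.pyRange 1 10 1).all (fun d =>
    (PySem.List.pyRange (100*d) (100*d+100) 1).all (fun M => fd M == d && lt2 M == M - 100*d))) = true := by rfl

theorem blocksFact' {d M : Int} (hd : d ∈ PySem.List.pyRange 1 10 1)
    (hM : M ∈ PySem.List.pyRange (100*d) (100*d+100) 1) : fd M = d ∧ lt2 M = M - 100*d := by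
  have h := List.all_eq_true.mp blocksFact d hd
  have h2 := List.all_eq_true.mp h M hM
  simp only [Bool.and_eq_true, beq_iff_eq] at h2
  exact h2

-- filtering a step-1 range for equality with a point
theorem filter_eq_pyRange (a b x : Int) :
    (PySem.List.pyRange a b 1).filter (fun M => decide (M = x)) =
      if a ≤ x ∧ x < b then [x] else [] := by
  obtain ⟨k, hk⟩ : ∃ k : Nat, (b - a).toNat = k := ⟨_, rfl⟩
  induction k generalizing a with
  | zero =>
    rw [PySem.List.pyRange_one_eq_nil (by omega), List.filter_nil, if_neg (by omega)]
  | succ k ih =>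
    have hab : a < b := by omega
    rw [PySem.List.pyRange_one_cons hab]
    by_cases hax : a = x
    · subst hax
      have hrest : (PySem.List.pyRange (a+1) b 1).filter (fun M => decide (M = a)) = [] := by
        apply List.filter_eq_nil_iff.mpr
        intro M hM
        have := PySem.List.mem_pyRange_one.mp hM
        simp only [decide_eq_true_eq]
        omega
      rw [List.filter_cons_of_pos (by simp), hrest,
          if_pos (show a ≤ a ∧ a < b from ⟨le_refl a, hab⟩)]
    · rw [List.filter_cons_of_neg (by simp [hax]), ih (a+1) (by omega)]
      split_ifs with h1 h2 <;> first | rfl | (exfalso; omega)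

-- A's loop body, with the two parsed quantities named, as a filter over the candidate range
theorem bodyEq (c1 c2 c3 : Prop) [Decidable c1] [Decidable c2] [Decidable c3] (acc : List Int) (x : Int) :
    (if c1 then acc else if c2 then acc else if c3 then acc ++ [x] else acc) =
    (if ¬c1 ∧ ¬c2 ∧ c3 then acc ++ [x] else acc) := by
  split_ifs <;> tauto

set_option maxRecDepth 10000 in
theorem loopA_eq_filter (p sm : Int) :
    (PySem.List.pyRange 100 (999+1) 1).foldl (fun s M =>
      if p = 0 ∧ PySem.Int.mod (fd M) 2 ≠ 0 then s
      else if p ≠ 0 ∧ PySem.Int.mod (fd M) 2 = 0 then s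
      else if lt2 M = sm then s ++ [M]
      else s) [] =
    (PySem.List.pyRange 100 (999+1) 1).filter (fun M =>
      decide (¬(p = 0 ∧ PySem.Int.mod (fd M) 2 ≠ 0) ∧ ¬(p ≠ 0 ∧ PySem.Int.mod (fd M) 2 = 0) ∧ lt2 M = sm)) := by
  rw [PySem.List.foldl_congr_mem (l := PySem.List.pyRange 100 (999+1) 1) (init := ([] : List Int))
    (f := fun s M =>
      if p = 0 ∧ PySem.Int.mod (fd M) 2 ≠ 0 then s
      else if p ≠ 0 ∧ PySem.Int.mod (fd M) 2 = 0 then s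
      else if lt2 M = sm then s ++ [M]
      else s)
    (g := fun s M =>
      if ¬(p = 0 ∧ PySem.Int.mod (fd M) 2 ≠ 0) ∧ ¬(p ≠ 0 ∧ PySem.Int.mod (fd M) 2 = 0) ∧ lt2 M = sm then s ++ [M] else s)
    (fun acc x _ => bodyEq _ _ _ acc x), PySem.List.foldl_append_ite_eq_filter]
  simp

-- one hundred-block of the filtered range, for a concrete first digit d starting at a = 100*d
theorem blockVal (p sm a d : Int) (ha : a = 100 * d) (hd1 : 1 ≤ d) (hd2 : d < 10) :
    (PySem.List.pyRange a (a+100) 1).filter (fun M =>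
      decide (¬(p = 0 ∧ PySem.Int.mod (fd M) 2 ≠ 0) ∧ ¬(p ≠ 0 ∧ PySem.Int.mod (fd M) 2 = 0) ∧ lt2 M = sm)) =
    if (¬(p = 0 ∧ PySem.Int.mod d 2 ≠ 0) ∧ ¬(p ≠ 0 ∧ PySem.Int.mod d 2 = 0)) ∧ 0 ≤ sm ∧ sm ≤ 99 then [a + sm] else [] := by
  subst ha
  have hd : d ∈ PySem.List.pyRange 1 10 1 := PySem.List.mem_pyRange_one.mpr ⟨hd1, hd2⟩
  by_cases hk : ¬(p = 0 ∧ PySem.Int.mod d 2 ≠ 0) ∧ ¬(p ≠ 0 ∧ PySem.Int.mod d 2 = 0)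
  · have hc : ∀ M ∈ PySem.List.pyRange (100*d) (100*d+100) 1,
        (decide (¬(p = 0 ∧ PySem.Int.mod (fd M) 2 ≠ 0) ∧ ¬(p ≠ 0 ∧ PySem.Int.mod (fd M) 2 = 0) ∧ lt2 M = sm))
          = decide (M = 100*d + sm) := by
      intro M hM
      obtain ⟨hfd, hlt⟩ := blocksFact' hd hM
      rw [hfd, hlt]
      simp only [decide_eq_decide]
      constructor
      · rintro ⟨-, -, h3⟩; omega
      · intro h; exact ⟨hk.1, hk.2, by omega⟩
    by_cases hsm : 0 ≤ sm ∧ sm ≤ 99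
    · rw [List.filter_congr hc, filter_eq_pyRange, if_pos (by omega), if_pos ⟨hk, hsm⟩]
    · rw [List.filter_congr hc, filter_eq_pyRange, if_neg (by omega), if_neg (fun h => hsm h.2)]
  · have hc : ∀ M ∈ PySem.List.pyRange (100*d) (100*d+100) 1,
        (decide (¬(p = 0 ∧ PySem.Int.mod (fd M) 2 ≠ 0) ∧ ¬(p ≠ 0 ∧ PySem.Int.mod (fd M) 2 = 0) ∧ lt2 M = sm))
          = false := by
      intro M hM
      obtain ⟨hfd, -⟩ := blocksFact' hd hM
      rw [hfd]
      simp only [decide_eq_false_iff_not]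
      intro h; exact hk ⟨h.1, h.2.1⟩
    rw [List.filter_congr hc]
    simp only [List.filter_false]
    rw [if_neg (fun h => hk h.1)]

set_option maxRecDepth 1000000 in
theorem hsplit : PySem.List.pyRange 100 (999+1) 1 =
    PySem.List.pyRange 100 (100+100) 1 ++ PySem.List.pyRange 200 (200+100) 1 ++
    PySem.List.pyRange 300 (300+100) 1 ++ PySem.List.pyRange 400 (400+100) 1 ++
    PySem.List.pyRange 500 (500+100) 1 ++ PySem.List.pyRange 600 (600+100) 1 ++
    PySem.List.pyRange 700 (700+100) 1 ++ PySem.List.pyRange 800 (800+100) 1 ++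
    PySem.List.pyRange 900 (900+100) 1 := by decide

-- the heart of the equivalence: A's scan equals B's direct construction, for any parity bit p and any digit sum sm
theorem main (p sm : Int) (hp : p = 0 ∨ p = 1) :
    (PySem.List.pyRange 100 (999+1) 1).foldl (fun s M =>
      if p = 0 ∧ PySem.Int.mod (fd M) 2 ≠ 0 then s
      else if p ≠ 0 ∧ PySem.Int.mod (fd M) 2 = 0 then s
      else if lt2 M = sm then s ++ [M]
      else s) [] =
    (if 0 ≤ sm ∧ sm ≤ 99 then
      (PySem.List.pyRange (if p ≠ 0 then (1 : Int) else 2) 10 2).foldl (fun res d1 => res ++ [d1 * 100 + sm]) []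
    else []) := by
  rw [loopA_eq_filter, hsplit]
  simp only [List.filter_append]
  rw [blockVal p sm 100 1 (by norm_num) (by norm_num) (by norm_num),
      blockVal p sm 200 2 (by norm_num) (by norm_num) (by norm_num),
      blockVal p sm 300 3 (by norm_num) (by norm_num) (by norm_num),
      blockVal p sm 400 4 (by norm_num) (by norm_num) (by norm_num),
      blockVal p sm 500 5 (by norm_num) (by norm_num) (by norm_num),
      blockVal p sm 600 6 (by norm_num) (by norm_num) (by norm_num),
      blockVal p sm 700 7 (by norm_num) (by norm_num) (by norm_num),
      blockVal p sm 800 8 (by norm_num) (by norm_num) (by norm_num),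
      blockVal p sm 900 9 (by norm_num) (by norm_num) (by norm_num)]
  by_cases hsm : 0 ≤ sm ∧ sm ≤ 99
  · rcases hp with hp | hp <;> subst hp
    · -- even N: keep blocks 2,4,6,8
      rw [if_neg (fun h => h.1.1 ⟨rfl, by decide⟩),
          if_pos (show ((¬((0:Int) = 0 ∧ PySem.Int.mod 2 2 ≠ 0) ∧ ¬((0:Int) ≠ 0 ∧ PySem.Int.mod 2 2 = 0)) ∧ 0 ≤ sm ∧ sm ≤ 99) from ⟨⟨fun h => h.2 (by decide), fun h => h.1 rfl⟩, hsm⟩),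
          if_neg (fun h => h.1.1 ⟨rfl, by decide⟩),
          if_pos (show ((¬((0:Int) = 0 ∧ PySem.Int.mod 4 2 ≠ 0) ∧ ¬((0:Int) ≠ 0 ∧ PySem.Int.mod 4 2 = 0)) ∧ 0 ≤ sm ∧ sm ≤ 99) from ⟨⟨fun h => h.2 (by decide), fun h => h.1 rfl⟩, hsm⟩),
          if_neg (fun h => h.1.1 ⟨rfl, by decide⟩),
          if_pos (show ((¬((0:Int) = 0 ∧ PySem.Int.mod 6 2 ≠ 0) ∧ ¬((0:Int) ≠ 0 ∧ PySem.Int.mod 6 2 = 0)) ∧ 0 ≤ sm ∧ sm ≤ 99) from ⟨⟨fun h => h.2 (by decide), fun h => h.1 rfl⟩, hsm⟩),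
          if_neg (fun h => h.1.1 ⟨rfl, by decide⟩),
          if_pos (show ((¬((0:Int) = 0 ∧ PySem.Int.mod 8 2 ≠ 0) ∧ ¬((0:Int) ≠ 0 ∧ PySem.Int.mod 8 2 = 0)) ∧ 0 ≤ sm ∧ sm ≤ 99) from ⟨⟨fun h => h.2 (by decide), fun h => h.1 rfl⟩, hsm⟩),
          if_neg (fun h => h.1.1 ⟨rfl, by decide⟩),
          if_pos hsm]
      rw [show (if (0:Int) ≠ 0 then (1:Int) else 2) = 2 from by norm_num]
      rw [show PySem.List.pyRange 2 10 2 = [2, 4, 6, 8] from by decide]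
      simp [List.foldl]
    · -- odd N: keep blocks 1,3,5,7,9
      rw [if_pos (show ((¬((1:Int) = 0 ∧ PySem.Int.mod 1 2 ≠ 0) ∧ ¬((1:Int) ≠ 0 ∧ PySem.Int.mod 1 2 = 0)) ∧ 0 ≤ sm ∧ sm ≤ 99) from ⟨⟨fun h => absurd h.1 (by norm_num), fun h => absurd h.2 (by decide)⟩, hsm⟩),
          if_neg (fun h => h.1.2 ⟨by norm_num, by decide⟩),
          if_pos (show ((¬((1:Int) = 0 ∧ PySem.Int.mod 3 2 ≠ 0) ∧ ¬((1:Int) ≠ 0 ∧ PySem.Int.mod 3 2 = 0)) ∧ 0 ≤ sm ∧ sm ≤ 99) from ⟨⟨fun h => absurd h.1 (by norm_num), fun h => absurd h.2 (by decide)⟩, hsm⟩),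
          if_neg (fun h => h.1.2 ⟨by norm_num, by decide⟩),
          if_pos (show ((¬((1:Int) = 0 ∧ PySem.Int.mod 5 2 ≠ 0) ∧ ¬((1:Int) ≠ 0 ∧ PySem.Int.mod 5 2 = 0)) ∧ 0 ≤ sm ∧ sm ≤ 99) from ⟨⟨fun h => absurd h.1 (by norm_num), fun h => absurd h.2 (by decide)⟩, hsm⟩),
          if_neg (fun h => h.1.2 ⟨by norm_num, by decide⟩),
          if_pos (show ((¬((1:Int) = 0 ∧ PySem.Int.mod 7 2 ≠ 0) ∧ ¬((1:Int) ≠ 0 ∧ PySem.Int.mod 7 2 = 0)) ∧ 0 ≤ sm ∧ sm ≤ 99) from ⟨⟨fun h => absurd h.1 (by norm_num), fun h => absurd h.2 (by decide)⟩, hsm⟩),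
          if_neg (fun h => h.1.2 ⟨by norm_num, by decide⟩),
          if_pos (show ((¬((1:Int) = 0 ∧ PySem.Int.mod 9 2 ≠ 0) ∧ ¬((1:Int) ≠ 0 ∧ PySem.Int.mod 9 2 = 0)) ∧ 0 ≤ sm ∧ sm ≤ 99) from ⟨⟨fun h => absurd h.1 (by norm_num), fun h => absurd h.2 (by decide)⟩, hsm⟩),
          if_pos hsm]
      rw [show (if (1:Int) ≠ 0 then (1:Int) else 2) = 1 from by norm_num]
      rw [show PySem.List.pyRange 1 10 2 = [1, 3, 5, 7, 9] from by decide]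
      simp [List.foldl]
  · rw [if_neg hsm]
    have hnone : ∀ k : Prop, ((k ∧ 0 ≤ sm ∧ sm ≤ 99) ↔ False) := by
      intro k; simp only [iff_false]; intro h; exact hsm h.2
    simp only [hnone, if_false]
    rfl

-- ===== VERDICT (by name: the statement is the Claim_ definition above) =====
theorem sopryag_spec : Claim_equal_sopryag := by
  intro N _ hpre
  unfold Spec_sopryag sopryag sopryag_alt
  have hp : PySem.Int.mod N 2 = 0 ∨ PySem.Int.mod N 2 = 1 := by
    have h1 := PySem.Int.mod_nonneg N (b := 2) (by norm_num)
    have h2 := PySem.Int.mod_lt N (b := 2) (by norm_num)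
    omega
  exact main (PySem.Int.mod N 2) _ hp
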